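-- pv_equiv track=rewrite | github.com/LiyuanLucasLiu/LightNER | lightner/utils.py | read_conll_features
-- ===== SOURCE A (Python) =====
-- def read_conll_features(lines, multi_docs = True):
--     """
--     convert un-annotated corpus into features
--     """
--     if multi_docs:
--         documents = list()
--         features = list()
--         tmp_fl = list()
--         for line in lines:
--             if_doc_end = (len(line) > 10 and line[0:10] == '-DOCSTART-')
--             if not (line.isspace() or if_doc_end):
--                 line = line.split()[0]
--                 tmp_fl.append(line)
--             else:
--                 if len(tmp_fl) > 0:
--                     features.append(tmp_fl)
--                     tmp_fl = list()
--                 if if_doc_end and len(features) > 0: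
--                     documents.append(features)
--                     features = list()
--         if len(tmp_fl) > 0:
--             features.append(tmp_fl)
--         if len(features) >0:
--             documents.append(features)
--         return documents
--     else:
--         features = list()
--         tmp_fl = list()
--         for line in lines:
--             if not (line.isspace() or (len(line) > 10 and line[0:10] == '-DOCSTART-')):
--                 line = line.split()[0]
--                 tmp_fl.append(line)
--             elif len(tmp_fl) > 0:
--                 features.append(tmp_fl)
--                 tmp_fl = list()
--         if len(tmp_fl) > 0:
--             features.append(tmp_fl)
--
--         return features
-- ===== SOURCE B (Python) =====
-- def read_conll_features(lines, multi_docs = True):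
--     """
--     convert un-annotated corpus into features
--     (two-phase: split into document chunks at -DOCSTART- lines, then split
--     each chunk into feature groups at whitespace-only lines)
--     """
--     def is_doc(line):
--         return len(line) > 10 and line[0:10] == '-DOCSTART-'
--
--     def groups(chunk):
--         gs = []
--         cur = []
--         for line in chunk:
--             if line.isspace() or is_doc(line):
--                 if cur:
--                     gs.append(cur)
--                     cur = []
--             else:
--                 cur.append(line.split()[0])
--         if cur:
--             gs.append(cur)
--         return gs
--
--     if multi_docs:
--         chunks = []
--         cur = []
--         for line in lines:
--             if is_doc(line):
--                 chunks.append(cur)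
--                 cur = []
--             else:
--                 cur.append(line)
--         chunks.append(cur)
--         return [g for g in (groups(c) for c in chunks) if g]
--     else:
--         return groups(lines)
-- ===== Notes on version B (the rewrite author's own statement) =====
-- stated objective: alternative
-- what changed: A's single pass with three simultaneous accumulators (documents/features/tmp_fl) is replaced by a two-phase nested segmentation: split the lines into document chunks at -DOCSTART- lines, then split each chunk into token groups at whitespace-only lines and drop empty groups/documents.
-- outside the precondition, e.g. on read_conll_features(['x'], False): A returns [['x']], B returns [['x']]
import Mathlib
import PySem

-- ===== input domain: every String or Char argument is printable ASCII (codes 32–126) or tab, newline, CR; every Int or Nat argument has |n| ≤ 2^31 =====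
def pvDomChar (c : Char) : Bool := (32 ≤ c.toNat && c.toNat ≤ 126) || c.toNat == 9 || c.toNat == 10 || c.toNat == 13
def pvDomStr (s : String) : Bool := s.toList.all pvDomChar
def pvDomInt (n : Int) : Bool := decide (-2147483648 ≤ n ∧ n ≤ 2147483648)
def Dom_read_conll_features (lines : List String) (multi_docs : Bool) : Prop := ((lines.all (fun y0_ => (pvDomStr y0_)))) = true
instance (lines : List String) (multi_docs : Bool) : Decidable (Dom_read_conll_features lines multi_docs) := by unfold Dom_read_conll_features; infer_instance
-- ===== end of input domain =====

-- B replaces A's single-pass three-accumulator state machine by a two-phase nested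
-- segmentation (split at -DOCSTART- lines into chunks, then split each chunk at
-- whitespace-only lines); same cost, different decomposition (objective: alternative).

-- Shared helpers: both Python versions contain the exact expressions
-- `len(line) > 10 and line[0:10] == '-DOCSTART-'` and `line.split()[0]`.
def pvIsDoc (line : String) : Bool :=
  decide (10 < PySem.Str.len line) && (PySem.Str.slice line (some 0) (some 10) == "-DOCSTART-")

-- line.split()[0]; Python raises IndexError on an empty split (only line = ""),
-- excluded by Pre_; the .getD "" default is never reached inside Pre_.
def pvTok (line : String) : String :=
  (PySem.List.pyGet? (PySem.Str.split₀ line) 0).getD ""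

-- ===== PORT A =====
-- the for-loop over lines with state (documents, features, tmp_fl)
def pvLoopA : List String → List (List (List String)) → List (List String) → List String → List (List (List String))
  | [], documents, features, tmp_fl =>
      -- trailing flush
      let features := if tmp_fl.length > 0 then features ++ [tmp_fl] else features
      if features.length > 0 then documents ++ [features] else documents
  | line :: rest, documents, features, tmp_fl =>
      let if_doc_end := pvIsDoc line
      if !(PySem.Str.strIsspace line || if_doc_end) then
        pvLoopA rest documents features (tmp_fl ++ [pvTok line])
      else
        let features' := if tmp_fl.length > 0 then features ++ [tmp_fl] else features
        let tmp' := if tmp_fl.length > 0 then ([] : List String) else tmp_fl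
        if if_doc_end && decide (features'.length > 0) then
          pvLoopA rest (documents ++ [features']) [] tmp'
        else
          pvLoopA rest documents features' tmp'

-- the multi_docs = False branch of the Python returns a list[list[str]], which is not a
-- value of the declared list[list[list[str]]] type; it is excluded by Pre_ and the port
-- returns [] there.
def read_conll_features (lines : List String) (multi_docs : Bool) : List (List (List String)) :=
  if multi_docs then pvLoopA lines [] [] [] else []

-- ===== PORT B =====
-- groups(chunk): split a chunk at separator lines into token groups
def pvGroupsLoop : List String → List (List String) → List String → List (List String)
  | [], gs, cur => if cur ≠ [] then gs ++ [cur] else gs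
  | line :: rest, gs, cur =>
      if PySem.Str.strIsspace line || pvIsDoc line then
        if cur ≠ [] then pvGroupsLoop rest (gs ++ [cur]) [] else pvGroupsLoop rest gs cur
      else
        pvGroupsLoop rest gs (cur ++ [pvTok line])

-- phase 1: split lines into document chunks at -DOCSTART- lines
def pvChunksLoop : List String → List (List String) → List String → List (List String)
  | [], chunks, cur => chunks ++ [cur]
  | line :: rest, chunks, cur =>
      if pvIsDoc line then pvChunksLoop rest (chunks ++ [cur]) []
      else pvChunksLoop rest chunks (cur ++ [line])

-- multi_docs = False excluded by Pre_ (differently-typed Python value), port returns [].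
def read_conll_features_alt (lines : List String) (multi_docs : Bool) : List (List (List String)) :=
  if multi_docs then
    ((pvChunksLoop lines [] []).map (fun c => pvGroupsLoop c [] [])).filter (fun g => g ≠ [])
  else []

-- ===== PRECONDITION & SPEC =====
-- Pre_ excludes (i) multi_docs = False, where the Python returns a list[list[str]], not a
-- value of the declared triply-nested type, and (ii) inputs containing an empty-string
-- line, on which both Pythons raise IndexError via line.split()[0].
def Pre_read_conll_features (lines : List String) (multi_docs : Bool) : Prop :=
  multi_docs = true ∧ "" ∉ lines
instance (lines : List String) (multi_docs : Bool) : Decidable (Pre_read_conll_features lines multi_docs) := by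
  unfold Pre_read_conll_features; infer_instance

def pvWitness_read_conll_features : List String × Bool :=
  (["EU rejects call", "German", "   ", "-DOCSTART- -X- O", "peace talks"], true)

def Spec_read_conll_features (lines : List String) (multi_docs : Bool) (out : List (List (List String))) : Prop := out = read_conll_features_alt lines multi_docs
instance (lines : List String) (multi_docs : Bool) (out : List (List (List String))) : Decidable (Spec_read_conll_features lines multi_docs out) := by unfold Spec_read_conll_features; infer_instance

-- ===== CLAIM (what is proved, stated in full; the proofs are below) =====
def Claim_equal_read_conll_features : Prop := ∀ (lines : List String) (multi_docs : Bool), Dom_read_conll_features lines multi_docs → Pre_read_conll_features lines multi_docs → Spec_read_conll_features lines multi_docs (read_conll_features lines multi_docs)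

-- ===== LEMMAS AND PROOFS =====

-- one group-splitting step, as a fold step (proof-only reformulation of pvGroupsLoop)
def pvGStep (st : List (List String) × List String) (line : String) : List (List String) × List String :=
  if PySem.Str.strIsspace line || pvIsDoc line then
    if st.2 ≠ [] then (st.1 ++ [st.2], []) else st
  else (st.1, st.2 ++ [pvTok line])

theorem pvGroupsLoop_eq_foldl (c : List String) : ∀ gs cur,
    pvGroupsLoop c gs cur =
      (c.foldl pvGStep (gs, cur)).1 ++
        (if (c.foldl pvGStep (gs, cur)).2 ≠ [] then [(c.foldl pvGStep (gs, cur)).2] else []) := by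
  induction c with
  | nil => intro gs cur; by_cases h : cur = [] <;> simp [pvGroupsLoop, h]
  | cons line rest ih =>
      intro gs cur
      by_cases hsep : PySem.Chars.strIsspace line.toList = true ∨ pvIsDoc line = true
      · by_cases hc : cur = [] <;> simp [pvGroupsLoop, pvGStep, hsep, hc, ih]
      · obtain ⟨hsp, hdp⟩ := not_or.mp hsep
        simp [pvGroupsLoop, pvGStep, hsp, hdp, ih]

theorem pvChunksLoop_prefix (lines : List String) : ∀ chunks cur,
    pvChunksLoop lines chunks cur = chunks ++ pvChunksLoop lines [] cur := by
  induction lines with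
  | nil => intro chunks cur; simp [pvChunksLoop]
  | cons line rest ih =>
      intro chunks cur
      by_cases hd : pvIsDoc line = true
      · have h1 : ∀ ch cu, pvChunksLoop (line :: rest) ch cu = pvChunksLoop rest (ch ++ [cu]) [] := by
          intro ch cu; simp [pvChunksLoop, hd]
        rw [h1, h1, ih (chunks ++ [cur]), ih ([] ++ [cur])]
        simp
      · have h1 : ∀ ch cu, pvChunksLoop (line :: rest) ch cu = pvChunksLoop rest ch (cu ++ [line]) := by
          intro ch cu; simp [pvChunksLoop, hd]
        rw [h1, h1, ih chunks]

theorem pvLoopA_prefix (lines : List String) : ∀ docs f t,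
    pvLoopA lines docs f t = docs ++ pvLoopA lines [] f t := by
  induction lines with
  | nil =>
      intro docs f t
      by_cases ht : t = []
      · subst ht
        by_cases hf : f = []
        · simp [pvLoopA, hf]
        · simp [pvLoopA, List.length_pos_of_ne_nil hf]
      · have htl := List.length_pos_of_ne_nil ht
        simp [pvLoopA, htl]
  | cons line rest ih =>
      intro docs f t
      by_cases hsep : PySem.Chars.strIsspace line.toList = true ∨ pvIsDoc line = true
      · by_cases hdp : pvIsDoc line = true
        · by_cases ht : t = []
          · by_cases hf : f = []
            · have h1 : ∀ d, pvLoopA (line :: rest) d f t = pvLoopA rest d f t := by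
                intro d; simp [pvLoopA, hdp, ht, hf]
              rw [h1, h1, ih docs]
            · have h1 : ∀ d, pvLoopA (line :: rest) d f t = pvLoopA rest (d ++ [f]) [] t := by
                intro d; simp [pvLoopA, hdp, ht, List.length_pos_of_ne_nil hf]
              rw [h1, h1, ih (docs ++ [f]), ih ([] ++ [f])]
              simp
          · have htl := List.length_pos_of_ne_nil ht
            have h1 : ∀ d, pvLoopA (line :: rest) d f t = pvLoopA rest (d ++ [f ++ [t]]) [] [] := by
              intro d; simp [pvLoopA, hdp, htl]
            rw [h1, h1, ih (docs ++ [f ++ [t]]), ih ([] ++ [f ++ [t]])]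
            simp
        · have hsp : PySem.Chars.strIsspace line.toList = true := hsep.resolve_right hdp
          by_cases ht : t = []
          · have h1 : ∀ d, pvLoopA (line :: rest) d f t = pvLoopA rest d f t := by
              intro d; simp [pvLoopA, hsp, hdp, ht]
            rw [h1, h1, ih docs]
          · have htl := List.length_pos_of_ne_nil ht
            have h1 : ∀ d, pvLoopA (line :: rest) d f t = pvLoopA rest d (f ++ [t]) [] := by
              intro d; simp [pvLoopA, hsp, hdp, htl]
            rw [h1, h1, ih docs]
      · obtain ⟨hsp, hdp⟩ := not_or.mp hsep
        have h1 : ∀ d, pvLoopA (line :: rest) d f t = pvLoopA rest d f (t ++ [pvTok line]) := by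
          intro d; simp [pvLoopA, hsp, hdp]
        rw [h1, h1, ih docs]

-- main invariant: A's mid-chunk state (features, tmp_fl) is the group-splitting fold
-- state over the raw lines c accumulated so far in B's current chunk
theorem pv_main (lines : List String) : ∀ c : List String,
    pvLoopA lines [] (c.foldl pvGStep ([], [])).1 (c.foldl pvGStep ([], [])).2 =
      ((pvChunksLoop lines [] c).map (fun ch => pvGroupsLoop ch [] [])).filter (fun g => g ≠ []) := by
  induction lines with
  | nil =>
      intro c
      rcases hst : c.foldl pvGStep ([], []) with ⟨f, t⟩
      have hg := pvGroupsLoop_eq_foldl c [] []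
      rw [hst] at hg
      simp only [pvChunksLoop, List.nil_append, List.map_cons, List.map_nil, hg]
      by_cases ht : t = []
      · subst ht
        by_cases hf : f = []
        · simp [pvLoopA, hf]
        · simp [pvLoopA, List.length_pos_of_ne_nil hf, hf]
      · have htl := List.length_pos_of_ne_nil ht
        simp [pvLoopA, htl, ht]
  | cons line rest ih =>
      intro c
      rcases hst : c.foldl pvGStep ([], []) with ⟨f, t⟩
      have hsnoc : (c ++ [line]).foldl pvGStep ([], []) = pvGStep (f, t) line := by
        rw [List.foldl_append, hst]; rfl
      have hg := pvGroupsLoop_eq_foldl c [] []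
      rw [hst] at hg
      by_cases hsep : PySem.Chars.strIsspace line.toList = true ∨ pvIsDoc line = true
      · by_cases hdp : pvIsDoc line = true
        · -- document boundary: chunk c is closed; features flushed and emitted if nonempty
          have hrhs : pvChunksLoop (line :: rest) [] c = [c] ++ pvChunksLoop rest [] [] := by
            have h1 : pvChunksLoop (line :: rest) [] c = pvChunksLoop rest [c] [] := by
              simp [pvChunksLoop, hdp]
            rw [h1, pvChunksLoop_prefix rest [c] []]
          have ih0 := ih []
          simp only [List.foldl_nil] at ih0
          by_cases ht : t = []
          · by_cases hf : f = []
            · have hlhs : pvLoopA (line :: rest) [] f t = pvLoopA rest [] f t := by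
                simp [pvLoopA, hdp, ht, hf]
              rw [hlhs, ht, hf, ih0, hrhs]
              simp [hg, ht, hf]
            · have hlhs : pvLoopA (line :: rest) [] f t = pvLoopA rest [f] [] t := by
                simp [pvLoopA, hdp, ht, List.length_pos_of_ne_nil hf]
              rw [hlhs, pvLoopA_prefix rest [f] [] t, ht, ih0, hrhs]
              simp [hg, ht, hf]
          · have htl := List.length_pos_of_ne_nil ht
            have hlhs : pvLoopA (line :: rest) [] f t = pvLoopA rest [f ++ [t]] [] [] := by
              simp [pvLoopA, hdp, htl]
            rw [hlhs, pvLoopA_prefix rest [f ++ [t]] [] [], ih0, hrhs]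
            simp [hg, ht]
        · -- whitespace-only separator inside the chunk: group flushed, chunk continues
          have hsp2 : PySem.Chars.strIsspace line.toList = true := hsep.resolve_right hdp
          have hrhs : pvChunksLoop (line :: rest) [] c = pvChunksLoop rest [] (c ++ [line]) := by
            simp [pvChunksLoop, hdp]
          by_cases ht : t = []
          · have hlhs : pvLoopA (line :: rest) [] f t = pvLoopA rest [] f t := by
              simp [pvLoopA, hsp2, hdp, ht]
            have hsn : (c ++ [line]).foldl pvGStep ([], []) = (f, t) := by
              rw [hsnoc]; simp [pvGStep, hsp2, ht]
            have ihc := ih (c ++ [line])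
            rw [hsn] at ihc
            rw [hlhs, ihc, hrhs]
          · have htl := List.length_pos_of_ne_nil ht
            have hlhs : pvLoopA (line :: rest) [] f t = pvLoopA rest [] (f ++ [t]) [] := by
              simp [pvLoopA, hsp2, hdp, htl]
            have hsn : (c ++ [line]).foldl pvGStep ([], []) = (f ++ [t], []) := by
              rw [hsnoc]; simp [pvGStep, hsp2, ht]
            have ihc := ih (c ++ [line])
            rw [hsn] at ihc
            rw [hlhs, ihc, hrhs]
      · -- content line: the token is appended to the current group of the current chunk
        obtain ⟨hsp, hdp⟩ := not_or.mp hsep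
        have hlhs : pvLoopA (line :: rest) [] f t = pvLoopA rest [] f (t ++ [pvTok line]) := by
          simp [pvLoopA, hsp, hdp]
        have hsn : (c ++ [line]).foldl pvGStep ([], []) = (f, t ++ [pvTok line]) := by
          rw [hsnoc]; simp [pvGStep, hsp, hdp]
        have ihc := ih (c ++ [line])
        rw [hsn] at ihc
        rw [hlhs, ihc]
        simp [pvChunksLoop, hdp]

-- ===== VERDICT (by name: the statement is the Claim_ definition above) =====
theorem read_conll_features_spec : Claim_equal_read_conll_features := by
  intro lines multi_docs _ hpre
  obtain ⟨hmd, -⟩ := hpre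
  subst hmd
  unfold Spec_read_conll_features read_conll_features read_conll_features_alt
  simp only [if_true]
  have := pv_main lines []
  simpa using this
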